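-- pv_equiv track=rewrite | github.com/DLapinM/Students_data | .venv/st_controller.py | get_NameString_From_String
-- ===== SOURCE A (Python) =====
-- def get_NameString_From_String(str):
--     str_new = ""
--     i = 0
--     for sym in str:
--         if sym.isalpha():
--             if i == 0:
--                 sym = sym.upper()
--                 pass
--             else:
--                 sym = sym.lower()
--                 pass
--             str_new += sym
--             i += 1
--             pass
--         pass
--     return str_new
-- ===== SOURCE B (Python) =====
-- def get_NameString_From_String(str):
--     # Traverse the string back-to-front collecting lowercased letters,
--     # then fix up the first letter (last appended) and reverse.
--     out = []
--     for c in reversed(str):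
--         if c.isalpha():
--             out.append(c.lower())
--     if out:
--         out[-1] = out[-1].upper()
--     out.reverse()
--     return ''.join(out)
-- ===== Notes on version B (the rewrite author's own statement) =====
-- stated objective: alternative
-- what changed: B traverses the string in reverse, appending lowercased letters, then patches the last-appended element (the first letter) to uppercase and reverses, instead of A's forward loop tracking a running position counter to decide the casing of each letter.
import Mathlib
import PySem

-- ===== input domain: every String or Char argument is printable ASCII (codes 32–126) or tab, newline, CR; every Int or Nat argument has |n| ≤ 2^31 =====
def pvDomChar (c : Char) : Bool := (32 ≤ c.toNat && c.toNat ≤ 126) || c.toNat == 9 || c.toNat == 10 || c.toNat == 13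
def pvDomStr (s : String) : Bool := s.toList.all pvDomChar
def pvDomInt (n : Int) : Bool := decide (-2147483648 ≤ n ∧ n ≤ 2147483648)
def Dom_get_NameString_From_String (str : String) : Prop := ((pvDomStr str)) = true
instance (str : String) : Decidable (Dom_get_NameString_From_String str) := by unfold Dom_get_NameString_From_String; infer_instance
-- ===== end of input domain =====

-- B traverses the string in reverse, appending lowercased letters, then patches the
-- last-appended element (the first letter) to uppercase and reverses; same O(n) cost
-- as A's forward position-counter loop (objective: alternative decomposition).

-- ===== PORT A =====
-- A's loop: state (str_new, i), appends upper/lower depending on whether i == 0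
def pvLoopA : List Char → List Char → Nat → List Char
  | [], acc, _ => acc
  | c :: rest, acc, i =>
    if PySem.Chars.isalpha c then
      pvLoopA rest (acc ++ [if i == 0 then PySem.Chars.upperChar c else PySem.Chars.lowerChar c]) (i + 1)
    else
      pvLoopA rest acc i

def get_NameString_From_String (str : String) : String :=
  String.mk (pvLoopA str.toList [] 0)

-- ===== PORT B =====
-- B's loop over the REVERSED character list, appending lowercased letters
def pvLoopB : List Char → List Char → List Char
  | [], out => out
  | c :: rest, out =>
    if PySem.Chars.isalpha c then pvLoopB rest (out ++ [PySem.Chars.lowerChar c]) else pvLoopB rest out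

-- out[-1] = out[-1].upper(): replace the last element (no-op on [])
def pvFixLast : List Char → List Char
  | [] => []
  | out => out.dropLast ++ [PySem.Chars.upperChar (out.getLast!)]

def get_NameString_From_String_alt (str : String) : String :=
  String.mk ((pvFixLast (pvLoopB str.toList.reverse [])).reverse)

-- ===== PRECONDITION & SPEC =====
def Spec_get_NameString_From_String (str : String) (out : String) : Prop := out = get_NameString_From_String_alt str
instance (str : String) (out : String) : Decidable (Spec_get_NameString_From_String str out) := by unfold Spec_get_NameString_From_String; infer_instance

-- ===== CLAIM (what is proved, stated in full; the proofs are below) =====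
def Claim_equal_get_NameString_From_String : Prop := ∀ (str : String), Dom_get_NameString_From_String str → Spec_get_NameString_From_String str (get_NameString_From_String str)

-- ===== LEMMAS AND PROOFS =====
lemma pvCharLe (a b : Char) : (a ≤ b) ↔ a.toNat ≤ b.toNat := by
  rw [Char.le_def, UInt32.le_iff_toNat_le]; rfl

-- ASCII fact: upper ∘ lower = upper on letters
lemma pvUpLow (c : Char) (ha : PySem.Chars.isalpha c = true) :
    PySem.Chars.upperChar (PySem.Chars.lowerChar c) = PySem.Chars.upperChar c := by
  have eA : ('A').toNat = 65 := rfl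
  have eZ : ('Z').toNat = 90 := rfl
  have ea : ('a').toNat = 97 := rfl
  have ez : ('z').toNat = 122 := rfl
  unfold PySem.Chars.isalpha PySem.Chars.isupper PySem.Chars.islower at ha
  simp only [Bool.or_eq_true, Bool.and_eq_true, decide_eq_true_eq, pvCharLe, eA, eZ, ea, ez] at ha
  rcases ha with ⟨h1, h2⟩ | ⟨h1, h2⟩
  · have hlow : PySem.Chars.lowerChar c = Char.ofNat (c.toNat + 32) := by
      unfold PySem.Chars.lowerChar PySem.Chars.isupper
      rw [if_pos (by simp only [Bool.and_eq_true, decide_eq_true_eq, pvCharLe, eA, eZ]; omega)]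
    have hv : (PySem.Chars.lowerChar c).toNat = c.toNat + 32 := by
      rw [hlow, Char.toNat_ofNat, if_pos (Or.inl (by omega))]
    unfold PySem.Chars.upperChar PySem.Chars.islower
    rw [if_pos (by simp only [Bool.and_eq_true, decide_eq_true_eq, pvCharLe, ea, ez]; rw [hv]; omega),
        if_neg (by simp only [Bool.and_eq_true, decide_eq_true_eq, pvCharLe, ea, ez]; omega),
        hv]
    simp [Char.ofNat_toNat c]
  · have hlow : PySem.Chars.lowerChar c = c := by
      unfold PySem.Chars.lowerChar PySem.Chars.isupper
      rw [if_neg (by simp only [Bool.and_eq_true, decide_eq_true_eq, pvCharLe, eA, eZ]; omega)]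
    rw [hlow]

lemma pvLoopA_pos (l : List Char) : ∀ (acc : List Char) (i : Nat), 1 ≤ i →
    pvLoopA l acc i = acc ++ (l.filter PySem.Chars.isalpha).map PySem.Chars.lowerChar := by
  induction l with
  | nil => intro acc i _; simp [pvLoopA]
  | cons c rest ih =>
    intro acc i hi
    by_cases h : PySem.Chars.isalpha c = true
    · have h0 : (i == 0) = false := by simp; omega
      simp [pvLoopA, h, h0, ih _ (i + 1) (by omega)]
    · simp [pvLoopA, h, ih _ i hi]

lemma pvLoopA_zero (l : List Char) : ∀ (acc : List Char),
    pvLoopA l acc 0 = acc ++ (match l.filter PySem.Chars.isalpha with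
      | [] => []
      | c :: rest => PySem.Chars.upperChar c :: rest.map PySem.Chars.lowerChar) := by
  induction l with
  | nil => intro acc; simp [pvLoopA]
  | cons c rest ih =>
    intro acc
    by_cases h : PySem.Chars.isalpha c = true
    · simp [pvLoopA, h, pvLoopA_pos rest _ 1 (by omega)]
    · simp [pvLoopA, h, ih]

lemma pvFixLast_ne (l : List Char) (h : l ≠ []) :
    pvFixLast l = l.dropLast ++ [PySem.Chars.upperChar l.getLast!] := by
  cases l with
  | nil => exact absurd rfl h
  | cons x xs => rfl

lemma pvLoopB_eq (l : List Char) : ∀ (out : List Char),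
    pvLoopB l out = out ++ (l.filter PySem.Chars.isalpha).map PySem.Chars.lowerChar := by
  induction l with
  | nil => intro out; simp [pvLoopB]
  | cons c rest ih =>
    intro out
    by_cases h : PySem.Chars.isalpha c = true
    · simp [pvLoopB, h, ih]
    · simp [pvLoopB, h, ih]

-- ===== VERDICT (by name: the statement is the Claim_ definition above) =====
theorem get_NameString_From_String_spec : Claim_equal_get_NameString_From_String := by
  intro str _
  unfold Spec_get_NameString_From_String get_NameString_From_String get_NameString_From_String_alt
  rw [pvLoopA_zero, pvLoopB_eq, List.filter_reverse, List.map_reverse]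
  cases hf : str.toList.filter PySem.Chars.isalpha with
  | nil => simp [pvFixLast]
  | cons c rest =>
    have hc : PySem.Chars.isalpha c = true := List.of_mem_filter (hf ▸ List.mem_cons_self)
    have hne : ((rest.map PySem.Chars.lowerChar).reverse ++ [PySem.Chars.lowerChar c]) ≠ [] := by
      simp
    simp only [List.map_cons, List.reverse_cons]
    simp only [List.nil_append]
    rw [pvFixLast_ne _ hne]
    simp [pvUpLow c hc]
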